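-- pv_equiv track=rewrite | github.com/soodal5629/codingTestProblemSolve | 문자열 압축.py | find
-- ===== SOURCE A (Python) =====
-- def find(s, i):
--     temp = 0
--     index = 0
--     next = index+i
--     flag = False
--     temp2 = 1
--     while index < len(s):
--         if s[index:next] == s[next:next+i]:
--             index = next
--             next = index + i
--             flag = True
--             temp2+=1
--             continue
--         else:
--             if flag: temp +=(len(str(temp2))+i)
--             else: temp+=len(s[index:index+i])
--             flag = False
--             index  = next
--             next = index +i
--             temp2=1
--     return temp
-- ===== SOURCE B (Python) =====
-- from itertools import groupby
--
-- def find(s, i):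
--     chunks = []
--     j = 0
--     while j < len(s):
--         chunks.append(s[j:j+i])
--         j += i
--     total = 0
--     for c, g in groupby(chunks):
--         n = len(list(g))
--         total += len(str(n)) + i if n > 1 else len(c)
--     return total
-- ===== Notes on version B (the rewrite author's own statement) =====
-- stated objective: idiomatic
-- what changed: A's single interleaved sweep with index/next/flag/temp2 state is replaced by first building the list of size-i chunks and then one itertools.groupby pass that adds len(str(n))+i per run of n>1 equal chunks and len(chunk) per singleton.
import Mathlib
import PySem

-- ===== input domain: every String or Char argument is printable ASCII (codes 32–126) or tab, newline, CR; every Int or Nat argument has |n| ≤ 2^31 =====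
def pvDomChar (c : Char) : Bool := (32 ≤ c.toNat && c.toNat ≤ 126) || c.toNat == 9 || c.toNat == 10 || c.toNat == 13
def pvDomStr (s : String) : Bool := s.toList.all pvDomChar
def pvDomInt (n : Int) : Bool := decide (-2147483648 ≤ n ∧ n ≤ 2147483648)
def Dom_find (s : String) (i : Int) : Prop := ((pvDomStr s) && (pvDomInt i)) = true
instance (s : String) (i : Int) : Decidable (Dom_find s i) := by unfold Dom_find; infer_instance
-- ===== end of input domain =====

-- B replaces A's interleaved index/flag/counter sweep by a chunk-list + groupby run-length pass (idiomatic decomposition; same cost).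

-- ===== PORT A =====
-- the while loop of A, one recursive step per iteration (fuel bounds the iterations; with
-- i ≥ 1 the loop runs at most len(s) times, so fuel len+1 is never exhausted inside Pre_)
def findLoopA (cs : List Char) (i : Int) : Nat → Int → Int → Int → Bool → Int → Int
  | 0, temp, _, _, _, _ => temp
  | fuel+1, temp, index, next, flag, temp2 =>
    if index < (cs.length : Int) then
      if PySem.List.slice cs (some index) (some next) = PySem.List.slice cs (some next) (some (next+i)) then
        findLoopA cs i fuel temp next (next+i) true (temp2+1)
      else
        findLoopA cs i fuel
          (if flag then temp + (((PySem.Int.toChars temp2).length : Int) + i)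
           else temp + ((PySem.List.slice cs (some index) (some (index+i))).length : Int))
          next (next+i) false 1
    else temp

def find (s : String) (i : Int) : Int :=
  findLoopA s.toList i (s.toList.length + 1) 0 0 (0+i) false 1

-- ===== PORT B =====
-- the `while j < len(s): chunks.append(s[j:j+i]); j += i` loop of B (same fuel bound)
def chunksLoopB (cs : List Char) (i : Int) : Nat → Int → List (List Char) → List (List Char)
  | 0, _, acc => acc.reverse
  | fuel+1, j, acc =>
    if j < (cs.length : Int) then
      chunksLoopB cs i fuel (j+i) (PySem.List.slice cs (some j) (some (j+i)) :: acc)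
    else acc.reverse

-- the itertools.groupby pass of B: each run of equal chunks contributes len(str(n))+i (n>1) or len(c)
def groupSumB (i : Int) : List (List Char) → Int
  | [] => 0
  | c :: rest =>
      let n : Int := ((rest.takeWhile (· == c)).length : Int) + 1
      (if n > 1 then ((PySem.Int.toChars n).length : Int) + i else (c.length : Int))
        + groupSumB i (rest.dropWhile (· == c))
  termination_by l => l.length
  decreasing_by
    simp only [List.length_cons]
    exact Nat.lt_succ_of_le (List.length_dropWhile_le _ _)

def find_alt (s : String) (i : Int) : Int :=
  groupSumB i (chunksLoopB s.toList i (s.toList.length + 1) 0 [])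

-- ===== PRECONDITION & SPEC =====
-- Pre_ excludes exactly the inputs on which A never returns: for i ≤ 0 and a non-empty s
-- the index never reaches len(s) and A's while loop diverges (Python hangs, no value).
def Pre_find (s : String) (i : Int) : Prop := 1 ≤ i ∨ s.toList = []
instance (s : String) (i : Int) : Decidable (Pre_find s i) := by unfold Pre_find; infer_instance
def pvWitness_find : String × Int := ("aabbaccca", 2)

def Spec_find (s : String) (i : Int) (out : Int) : Prop := out = find_alt s i
instance (s : String) (i : Int) (out : Int) : Decidable (Spec_find s i out) := by unfold Spec_find; infer_instance

-- ===== CLAIM (what is proved, stated in full; the proofs are below) =====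
def Claim_equal_find : Prop := ∀ (s : String) (i : Int), Dom_find s i → Pre_find s i → Spec_find s i (find s i)

-- ===== LEMMAS AND PROOFS =====

-- the sequence of chunks s[j:j+i], s[j+i:j+2i], … (proof-side reference list)
def chunkF (cs : List Char) (i : Int) : Nat → Int → List (List Char)
  | 0, _ => []
  | fuel+1, j =>
    if j < (cs.length : Int) then
      PySem.List.slice cs (some j) (some (j+i)) :: chunkF cs i fuel (j+i)
    else []

-- A's loop replayed on the chunk list (proof-side bridge between the two ports)
def runH (i : Int) : List (List Char) → Bool → Int → Int
  | [], _, _ => 0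
  | c :: rest, flag, t2 =>
    if c = rest.headD [] then runH i rest true (t2+1)
    else (if flag then ((PySem.Int.toChars t2).length : Int) + i else (c.length : Int)) + runH i rest false 1

theorem slice_of_ge_len (cs : List Char) (j b : Int) (hj : 0 ≤ j) (hb : 0 ≤ b)
    (h : (cs.length : Int) ≤ j) : PySem.List.slice cs (some j) (some b) = [] := by
  rw [PySem.List.slice_toNat cs hj hb]
  have : cs.length ≤ j.toNat := by omega
  simp [List.drop_eq_nil_of_le this]

theorem slice_ne_nil (cs : List Char) (j i : Int) (hj : 0 ≤ j) (hi : 1 ≤ i)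
    (h : j < (cs.length : Int)) : PySem.List.slice cs (some j) (some (j+i)) ≠ [] := by
  rw [PySem.List.slice_toNat cs hj (by omega)]
  intro hnil
  have := congrArg List.length hnil
  simp [List.length_take, List.length_drop] at this
  omega

theorem chunksLoopB_eq (cs : List Char) (i : Int) :
    ∀ (fuel : Nat) (j : Int) (acc : List (List Char)),
      chunksLoopB cs i fuel j acc = acc.reverse ++ chunkF cs i fuel j := by
  intro fuel
  induction fuel with
  | zero => intro j acc; simp [chunksLoopB, chunkF]
  | succ f ih =>
    intro j acc
    simp only [chunksLoopB, chunkF]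
    split
    · rw [ih]; simp
    · simp

theorem headD_chunkF (cs : List Char) (i : Int) (fuel : Nat) (j : Int)
    (hj : 0 ≤ j) (hi : 1 ≤ i) (h : (cs.length : Int) ≤ j ∨ 1 ≤ fuel) :
    (chunkF cs i fuel j).headD [] = PySem.List.slice cs (some j) (some (j+i)) := by
  by_cases hlt : j < (cs.length : Int)
  · rcases h with h | h
    · omega
    · obtain ⟨f, rfl⟩ : ∃ f, fuel = f + 1 := ⟨fuel - 1, by omega⟩
      simp [chunkF, hlt]
  · have h' : (cs.length : Int) ≤ j := by omega
    rw [slice_of_ge_len cs j (j+i) hj (by omega) h']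
    cases fuel <;> simp [chunkF, hlt]

theorem chunkF_nonempty (cs : List Char) (i : Int) (hi : 1 ≤ i) :
    ∀ (fuel : Nat) (j : Int), 0 ≤ j → ∀ c ∈ chunkF cs i fuel j, c ≠ [] := by
  intro fuel
  induction fuel with
  | zero => intro j _ c hc; simp [chunkF] at hc
  | succ f ih =>
    intro j hj c hc
    simp only [chunkF] at hc
    split at hc
    · rcases List.mem_cons.mp hc with rfl | hc
      · exact slice_ne_nil cs j i hj hi (by assumption)
      · exact ih (j+i) (by omega) c hc
    · simp at hc

theorem step1 (cs : List Char) (i : Int) (hi : 1 ≤ i) :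
    ∀ (fuel : Nat) (j temp : Int) (flag : Bool) (t2 : Int), 0 ≤ j →
      (cs.length : Int) ≤ j + (fuel : Int) * i →
      findLoopA cs i fuel temp j (j+i) flag t2 = temp + runH i (chunkF cs i fuel j) flag t2 := by
  intro fuel
  induction fuel with
  | zero =>
    intro j temp flag t2 hj hfuel
    have : ¬ j < (cs.length : Int) := by push_cast at hfuel ⊢; omega
    simp [findLoopA, chunkF, runH]
  | succ f ih =>
    intro j temp flag t2 hj hfuel
    have hexp : j + ((f : Int) + 1) * i = (j + i) + (f : Int) * i := by ring
    have hbound : (cs.length : Int) ≤ (j + i) + (f : Int) * i := by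
      push_cast at hfuel; linarith [hexp.symm.le]
    by_cases hlt : j < (cs.length : Int)
    · have hhd : (chunkF cs i f (j+i)).headD [] = PySem.List.slice cs (some (j+i)) (some ((j+i)+i)) := by
        apply headD_chunkF cs i f (j+i) (by omega) hi
        rcases Nat.eq_zero_or_pos f with rfl | hf
        · left; push_cast at hbound; linarith
        · right; omega
      simp only [findLoopA, chunkF]
      rw [if_pos hlt, if_pos hlt]
      simp only [runH, hhd]
      by_cases heq : PySem.List.slice cs (some j) (some (j+i)) = PySem.List.slice cs (some (j+i)) (some ((j+i)+i))
      · rw [if_pos heq, if_pos heq]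
        exact ih (j+i) temp true (t2+1) (by omega) hbound
      · rw [if_neg heq, if_neg heq]
        rw [ih (j+i) _ false 1 (by omega) hbound]
        cases flag <;> simp only [Bool.false_eq_true, if_false, if_true] <;> ring
    · simp [findLoopA, chunkF, hlt, runH]

theorem runH_run (i : Int) :
    ∀ (rest : List (List Char)) (c : List Char) (t2 : Int), c ≠ [] →
      runH i (c :: rest) true t2 =
        (((PySem.Int.toChars (t2 + ((rest.takeWhile (· == c)).length : Int))).length : Int) + i)
          + runH i (rest.dropWhile (· == c)) false 1 := by
  intro rest
  induction rest with
  | nil =>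
    intro c t2 hc
    conv_lhs => rw [runH]
    rw [if_neg (by simpa using hc)]
    simp [runH]
  | cons d rs ih =>
    intro c t2 hc
    by_cases hcd : c = d
    · subst hcd
      have h1 : runH i (c :: c :: rs) true t2 = runH i (c :: rs) true (t2+1) := by
        conv_lhs => rw [runH]
        rw [if_pos (by simp)]
      rw [h1, ih c (t2+1) hc]
      have harg : (t2 + 1) + ((rs.takeWhile (· == c)).length : Int)
           = t2 + (((c :: rs).takeWhile (· == c)).length : Int) := by
        rw [List.takeWhile_cons]
        simp only [beq_self_eq_true, if_true, List.length_cons]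
        push_cast
        ring
      rw [harg]
      have : (c :: rs).dropWhile (· == c) = rs.dropWhile (· == c) := by
        rw [List.dropWhile_cons]; simp
      rw [this]
    · have hhd : c ≠ (d :: rs).headD [] := by simpa using hcd
      have h1 : runH i (c :: d :: rs) true t2
          = (((PySem.Int.toChars t2).length : Int) + i) + runH i (d :: rs) false 1 := by
        conv_lhs => rw [runH]
        rw [if_neg hhd]
        simp
      rw [h1]
      have htw : (d :: rs).takeWhile (· == c) = [] := by
        rw [List.takeWhile_cons]; simp [beq_iff_eq, Ne.symm hcd]
      have hdw : (d :: rs).dropWhile (· == c) = d :: rs := by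
        rw [List.dropWhile_cons]; simp [beq_iff_eq, Ne.symm hcd]
      rw [htw, hdw]
      simp

theorem runH_false (i : Int) :
    ∀ (n : Nat) (l : List (List Char)), l.length ≤ n → (∀ c ∈ l, c ≠ []) →
      runH i l false 1 = groupSumB i l := by
  intro n
  induction n with
  | zero =>
    intro l hl _
    have : l = [] := List.eq_nil_of_length_eq_zero (by omega)
    subst this; simp [runH, groupSumB]
  | succ m ih =>
    intro l hl hne
    match l with
    | [] => simp [runH, groupSumB]
    | c :: rest =>
      have hc : c ≠ [] := hne c (by simp)
      match rest with
      | [] =>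
        conv_lhs => rw [runH]
        rw [if_neg (by simpa using hc)]
        simp [runH, groupSumB]
      | d :: rs =>
        by_cases hcd : c = d
        · subst hcd
          have h1 : runH i (c :: c :: rs) false 1 = runH i (c :: rs) true 2 := by
            conv_lhs => rw [runH]
            rw [if_pos (by simp)]
            norm_num
          rw [h1, runH_run i rs c 2 hc]
          have hlen : (rs.dropWhile (· == c)).length ≤ m := by
            have := List.length_dropWhile_le (fun x => x == c) rs
            simp at hl; omega
          have hne' : ∀ x ∈ rs.dropWhile (· == c), x ≠ [] := by
            intro x hx
            exact hne x (by
              have : x ∈ rs := (List.dropWhile_sublist _).mem hx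
              simp [this])
          rw [ih (rs.dropWhile (· == c)) hlen hne']
          show _ = groupSumB i (c :: c :: rs)
          rw [groupSumB]
          have htw : ((c :: rs).takeWhile (· == c)).length = 1 + (rs.takeWhile (· == c)).length := by
            rw [List.takeWhile_cons]; simp; omega
          have hdweq : (c :: rs).dropWhile (· == c) = rs.dropWhile (· == c) := by
            rw [List.dropWhile_cons]; simp
          simp only [htw, hdweq]
          rw [if_pos (by push_cast; omega)]
          have harg : ((1 + (rs.takeWhile (· == c)).length : Nat) : Int) + 1
               = (2 : Int) + ((rs.takeWhile (· == c)).length : Int) := by push_cast; ring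
          rw [harg]
        · have hhd : c ≠ (d :: rs).headD [] := by simpa using hcd
          have h1 : runH i (c :: d :: rs) false 1 = (c.length : Int) + runH i (d :: rs) false 1 := by
            conv_lhs => rw [runH]
            rw [if_neg hhd]
            norm_num
          rw [h1, ih (d :: rs) (by simp at hl ⊢; omega) (fun x hx => hne x (by simp at hx ⊢; tauto))]
          show _ = groupSumB i (c :: d :: rs)
          conv_rhs => rw [groupSumB]
          have htw : (d :: rs).takeWhile (· == c) = [] := by
            rw [List.takeWhile_cons]; simp [beq_iff_eq, Ne.symm hcd]
          have hdw : (d :: rs).dropWhile (· == c) = d :: rs := by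
            rw [List.dropWhile_cons]; simp [beq_iff_eq, Ne.symm hcd]
          rw [htw, hdw]
          norm_num

-- ===== VERDICT (by name: the statement is the Claim_ definition above) =====
theorem find_spec : Claim_equal_find := by
  intro s i _ hpre
  unfold Spec_find find find_alt
  rcases hpre with hi | hnil
  · set cs := s.toList with hcs
    have hfuel : (cs.length : Int) ≤ 0 + ((cs.length + 1 : Nat) : Int) * i := by
      have h1 : ((cs.length + 1 : Nat) : Int) * 1 ≤ ((cs.length + 1 : Nat) : Int) * i :=
        mul_le_mul_of_nonneg_left hi (by positivity)
      push_cast at h1 ⊢; omega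
    rw [show (0 + i : Int) = 0 + i from rfl]
    rw [step1 cs i hi (cs.length + 1) 0 0 false 1 le_rfl hfuel]
    rw [chunksLoopB_eq cs i (cs.length + 1) 0 []]
    simp only [List.reverse_nil, List.nil_append, zero_add]
    exact runH_false i (chunkF cs i (cs.length+1) 0).length _ le_rfl
      (chunkF_nonempty cs i hi (cs.length+1) 0 le_rfl)
  · simp [hnil, findLoopA, chunksLoopB, groupSumB]
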